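-- pv_equiv track=rewrite | github.com/lightbeem3296/scrap-www.cde.ca.gov | merge_result.py | regulate_str
-- ===== SOURCE A (Python) =====
-- def regulate_str(input_str: str) -> str:
--     lines = input_str.splitlines()
--
--     trimmed_lines = [line.strip() for line in lines]
--
--     regulated_lines = []
--     previous_line_empty = False
--
--     for line in trimmed_lines:
--         if line == "":
--             if not previous_line_empty:
--                 regulated_lines.append(line)
--             previous_line_empty = True
--         else:
--             regulated_lines.append(line)
--             previous_line_empty = False
--
--     ret = "\n".join(regulated_lines)
--     return ret.strip()
-- ===== SOURCE B (Python) =====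
-- def regulate_str(input_str: str) -> str:
--     lines = [line.strip() for line in input_str.splitlines()]
--     paragraphs = []
--     i = 0
--     n = len(lines)
--     while i < n:
--         if lines[i] == "":
--             i += 1
--         else:
--             j = i
--             while j < n and lines[j] != "":
--                 j += 1
--             paragraphs.append("\n".join(lines[i:j]))
--             i = j
--     return "\n\n".join(paragraphs)
-- ===== Notes on version B (the rewrite author's own statement) =====
-- stated objective: alternative
-- what changed: Instead of a stateful blank-collapse loop followed by a final strip, B scans the stripped lines with two indices to extract maximal non-blank runs as paragraphs and joins them with a double newline, needing no collapse flag and no final strip.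
import Mathlib
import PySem

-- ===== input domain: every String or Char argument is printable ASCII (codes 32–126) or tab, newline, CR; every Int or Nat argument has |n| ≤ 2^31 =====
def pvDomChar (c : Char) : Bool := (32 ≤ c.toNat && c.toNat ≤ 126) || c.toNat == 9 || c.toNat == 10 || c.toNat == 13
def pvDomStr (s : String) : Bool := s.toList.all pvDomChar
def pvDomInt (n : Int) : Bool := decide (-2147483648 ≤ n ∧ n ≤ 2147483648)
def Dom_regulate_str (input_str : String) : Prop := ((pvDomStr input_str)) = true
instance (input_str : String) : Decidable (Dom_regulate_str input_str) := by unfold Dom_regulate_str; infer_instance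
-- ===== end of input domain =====

-- B replaces A's stateful blank-collapse loop + final strip by a two-pointer scan that extracts
-- maximal non-blank runs (paragraphs) and joins them with "\n\n" (alternative; return value proved equal).

-- ===== PORT A =====
/-- The body of A's `for line in trimmed_lines` loop, acting on the state (regulated_lines, previous_line_empty). -/
def pvStepA (acc : List String × Bool) (line : String) : List String × Bool :=
  if line = "" then (if !acc.2 then (acc.1 ++ [line], true) else (acc.1, true))
  else (acc.1 ++ [line], false)

def regulate_str (input_str : String) : String :=
  let lines := PySem.Str.splitlines input_str
  let trimmed_lines := lines.map PySem.Str.strip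
  let st := trimmed_lines.foldl pvStepA ([], false)
  PySem.Str.strip (PySem.Str.join "\n" st.1)

-- ===== PORT B =====
/-- Source B's inner test `lines[j] != ""` (is the line non-blank?). -/

def pvNB (x : String) : Bool := !(x == "")

/-- Source B's outer while loop: skip a blank line, or (the two-pointer scan `j`) split off the maximal
non-blank run `lines[i:j]` — here `l :: takeWhile pvNB` — and continue at `i = j`. -/
def pvParas : List String → List (List String)
  | [] => []
  | l :: ls =>
    if l = "" then pvParas ls
    else (l :: ls.takeWhile pvNB) :: pvParas (ls.dropWhile pvNB)
termination_by ls => ls.length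
decreasing_by
  · simp
  · exact Nat.lt_succ_of_le (List.length_dropWhile_le _ _)

def regulate_str_alt (input_str : String) : String :=
  let lines := (PySem.Str.splitlines input_str).map PySem.Str.strip
  PySem.Str.join "\n\n" ((pvParas lines).map (PySem.Str.join "\n"))

-- ===== PRECONDITION & SPEC =====
def Spec_regulate_str (input_str : String) (out : String) : Prop := out = regulate_str_alt input_str
instance (input_str : String) (out : String) : Decidable (Spec_regulate_str input_str out) := by unfold Spec_regulate_str; infer_instance

-- ===== CLAIM (what is proved, stated in full; the proofs are below) =====
def Claim_equal_regulate_str : Prop := ∀ (input_str : String), Dom_regulate_str input_str → Spec_regulate_str input_str (regulate_str input_str)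

-- ===== LEMMAS AND PROOFS =====


theorem intercalate_cons₂ {α : Type} (sep : List α) (x : List α) (xs : List (List α)) (h : xs ≠ []) :
    sep.intercalate (x :: xs) = x ++ sep ++ sep.intercalate xs := by
  obtain ⟨y, ys, rfl⟩ := List.exists_cons_of_ne_nil h
  simp [List.intercalate, List.intersperse]

theorem inter_append {α : Type} (sep : List α) (as bs : List (List α)) (ha : as ≠ []) (hb : bs ≠ []) :
    sep.intercalate (as ++ bs) = sep.intercalate as ++ sep ++ sep.intercalate bs := by
  induction as with
  | nil => exact absurd rfl ha
  | cons a as ih =>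
    rcases eq_or_ne as [] with rfl | hne
    · rw [List.singleton_append, intercalate_cons₂ _ _ _ hb]
      simp [List.intercalate, List.append_assoc]
    · rw [List.cons_append, intercalate_cons₂ _ _ _ (by simp [hne]),
        intercalate_cons₂ _ _ _ hne, ih hne]
      simp [List.append_assoc]

theorem inter_ne_nil {α : Type} (sep : List α) (x : List α) (xs : List (List α)) (hx : x ≠ []) :
    sep.intercalate (x :: xs) ≠ [] := by
  rcases eq_or_ne xs [] with rfl | hne
  · simpa [List.intercalate]
  · rw [intercalate_cons₂ _ _ _ hne]
    simp [hx]

theorem head?_inter {α : Type} (sep : List α) (x : List α) (xs : List (List α)) (hx : x ≠ []) :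
    (sep.intercalate (x :: xs)).head? = x.head? := by
  rcases eq_or_ne xs [] with rfl | hne
  · simp [List.intercalate]
  · rw [intercalate_cons₂ _ _ _ hne, List.append_assoc, List.head?_append_of_ne_nil _ hx]

theorem getLast?_inter {α : Type} (sep : List α) (hsep : sep ≠ []) :
    ∀ (xss : List (List α)) (g : List α), xss.getLast? = some g → g ≠ [] →
      (sep.intercalate xss).getLast? = g.getLast?
  | [], g, h, _ => by simp at h
  | [x], g, h, hg => by
    have hgx : x = g := by simpa using h
    subst hgx
    simp [List.intercalate]
  | x :: y :: t, g, h, hg => by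
    rw [List.getLast?_cons_cons] at h
    have hI : (sep.intercalate (y :: t)).getLast? = g.getLast? := getLast?_inter sep hsep (y :: t) g h hg
    have hIne : sep.intercalate (y :: t) ≠ [] := by
      rcases eq_or_ne t [] with rfl | hne
      · have hgy : y = g := by simpa using h
        subst hgy
        simpa [List.intercalate]
      · rw [intercalate_cons₂ _ _ _ hne]
        simp [hsep]
    rw [intercalate_cons₂ _ _ _ (by simp), List.getLast?_append_of_ne_nil _ hIne, hI]

-- strip facts
theorem dropWhile_head?_false {α : Type} (p : α → Bool) (ls : List α) (c : α)
    (h : (ls.dropWhile p).head? = some c) : p c = false := by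
  induction ls with
  | nil => simp at h
  | cons a as ih =>
    by_cases hpa : p a
    · exact ih (by simpa [List.dropWhile_cons, hpa] using h)
    · rw [List.dropWhile_cons, if_neg hpa] at h
      simp only [List.head?_cons, Option.some.injEq] at h
      subst h; simpa using hpa

theorem lstrip_id (cs : List Char) (h : ∀ c, cs.head? = some c → PySem.Chars.isspace c = false) :
    PySem.Chars.lstrip cs = cs := by
  cases cs with
  | nil => simp [PySem.Chars.lstrip]
  | cons a as => simp [PySem.Chars.lstrip, h a rfl]

theorem rstrip_id (cs : List Char) (h : ∀ c, cs.getLast? = some c → PySem.Chars.isspace c = false) :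
    PySem.Chars.rstrip cs = cs := by
  unfold PySem.Chars.rstrip
  rw [show List.dropWhile PySem.Chars.isspace cs.reverse = PySem.Chars.lstrip cs.reverse from rfl,
    lstrip_id cs.reverse (by simpa [List.head?_reverse] using h), List.reverse_reverse]

theorem strip_id (cs : List Char)
    (h1 : ∀ c, cs.head? = some c → PySem.Chars.isspace c = false)
    (h2 : ∀ c, cs.getLast? = some c → PySem.Chars.isspace c = false) :
    PySem.Chars.strip cs = cs := by
  unfold PySem.Chars.strip
  rw [lstrip_id cs h1, rstrip_id cs h2]

theorem strip_cons_nl (cs : List Char) : PySem.Chars.strip ('\n' :: cs) = PySem.Chars.strip cs := by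
  unfold PySem.Chars.strip PySem.Chars.lstrip
  rw [List.dropWhile_cons, if_pos (by decide)]

theorem strip_append_nl (cs : List Char) : PySem.Chars.strip (cs ++ ['\n']) = PySem.Chars.strip cs := by
  unfold PySem.Chars.strip
  rcases eq_or_ne (PySem.Chars.lstrip cs) [] with he | hne
  · unfold PySem.Chars.lstrip at *
    rw [List.dropWhile_append, he]
    simp [PySem.Chars.rstrip, show PySem.Chars.isspace '\n' = true by decide]
  · unfold PySem.Chars.lstrip at *
    rw [List.dropWhile_append, if_neg (by simpa [List.isEmpty_iff] using hne)]
    unfold PySem.Chars.rstrip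
    rw [List.reverse_append]
    simp only [List.reverse_singleton, List.singleton_append, List.dropWhile_cons,
      show PySem.Chars.isspace '\n' = true by decide, if_pos]

theorem strip_head_nonspace (t : List Char) (c : Char)
    (h : (PySem.Chars.strip t).head? = some c) : PySem.Chars.isspace c = false := by
  unfold PySem.Chars.strip PySem.Chars.rstrip at h
  set y := PySem.Chars.lstrip t with hy
  have hsuf : (y.reverse.dropWhile PySem.Chars.isspace) <:+ y.reverse := List.dropWhile_suffix _
  have hpre : (y.reverse.dropWhile PySem.Chars.isspace).reverse <+: y := by
    have := List.reverse_prefix.mpr hsuf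
    simpa using this
  obtain ⟨r, hr⟩ := hpre
  obtain ⟨tl, htl⟩ := List.head?_eq_some_iff.mp h
  have hyc : y.head? = some c := by
    rw [← hr, htl]; simp
  unfold PySem.Chars.lstrip at hy
  exact dropWhile_head?_false _ _ _ (hy ▸ hyc)

theorem strip_last_nonspace (t : List Char) (c : Char)
    (h : (PySem.Chars.strip t).getLast? = some c) : PySem.Chars.isspace c = false := by
  unfold PySem.Chars.strip PySem.Chars.rstrip at h
  rw [List.getLast?_reverse] at h
  exact dropWhile_head?_false _ _ _ h

theorem pvJR (ps : List (List String)) (h : ∀ p ∈ ps, p ≠ []) :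
    ['\n'].intercalate ((List.intercalate [""] ps).map String.toList)
      = ['\n', '\n'].intercalate (ps.map (fun p => ['\n'].intercalate (p.map String.toList))) := by
  induction ps with
  | nil => simp [List.intercalate]
  | cons p ps ih =>
    rcases eq_or_ne ps [] with rfl | hne
    · simp [List.intercalate]
    · have hp : p ≠ [] := h p (by simp)
      have hq : ∀ q ∈ ps, q ≠ [] := fun q hq => h q (by simp [hq])
      obtain ⟨q, qs, rfl⟩ := List.exists_cons_of_ne_nil hne
      have hWne : List.intercalate [""] (q :: qs) ≠ [] := inter_ne_nil _ _ _ (hq q (by simp))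
      have hWmne : (List.intercalate [""] (q :: qs)).map String.toList ≠ [] := by simpa using hWne
      rw [intercalate_cons₂ ([""]) p (q :: qs) hne, List.append_assoc, List.map_append,
        inter_append _ _ _ (by simpa using hp) (by simp),
        List.map_append,
        inter_append _ _ _ (by simp) hWmne]
      simp only [List.map_cons]
      rw [intercalate_cons₂ ['\n','\n'] (['\n'].intercalate (List.map String.toList p))
        (['\n'].intercalate (List.map String.toList q)
          :: List.map (fun p => ['\n'].intercalate (List.map String.toList p)) qs) (by simp)]
      have := ih hq
      simp only [List.map_cons] at this
      rw [← this]
      simp [List.intercalate]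

def pvRecA : List String → Bool → List String
  | [], _ => []
  | l :: ls, prev =>
    if l = "" then (if prev then pvRecA ls true else l :: pvRecA ls true)
    else l :: pvRecA ls false

def pvTrail (ls : List String) : Bool := ls.getLast? == some ""

def pvBody (ls : List String) : List String :=
  if pvParas ls = [] then []
  else List.intercalate [""] (pvParas ls) ++ (if pvTrail ls then [""] else [])

theorem pvDropWhile_head {α : Type} (p : α → Bool) (ls : List α) (d : α) (ds : List α)
    (h : ls.dropWhile p = d :: ds) : p d = false := by
  induction ls with
  | nil => simp at h
  | cons a as ih =>
    by_cases hpa : p a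
    · exact ih (by simpa [List.dropWhile_cons, hpa] using h)
    · rw [List.dropWhile_cons, if_neg hpa] at h
      obtain ⟨rfl, -⟩ := List.cons.inj h
      simpa using hpa

theorem pvParas_nil_iff (ls : List String) : pvParas ls = [] ↔ ∀ x ∈ ls, x = "" := by
  induction ls using pvParas.induct with
  | case1 => simp [pvParas]
  | case2 ls ih => simp [pvParas, ih]
  | case3 l ls h ih =>
    simp only [pvParas, if_neg h]
    constructor
    · intro hc; exact absurd hc (by simp)
    · intro hall; exact absurd (hall l (by simp)) h

theorem pvRecA_push (tw rest : List String) (h : ∀ x ∈ tw, x ≠ "") :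
    pvRecA (tw ++ rest) false = tw ++ pvRecA rest false := by
  induction tw with
  | nil => simp
  | cons t tw ih =>
    have ht : t ≠ "" := h t (by simp)
    simp [pvRecA, ht, ih fun x hx => h x (by simp [hx])]

theorem pvGetLast_all_blank (ls : List String) (hne : ls ≠ []) (hall : ∀ x ∈ ls, x = "") :
    ls.getLast? = some "" := by
  rw [List.getLast?_eq_some_getLast hne, hall _ (List.getLast_mem hne)]

theorem pvCase3_aux (l : String) (hl : l ≠ "") (tw dw : List String)
    (htw : ∀ x ∈ tw, x ≠ "") (hdw : dw = [] ∨ ∃ ds, dw = "" :: ds)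
    (ih : pvRecA dw true = pvBody dw) :
    pvRecA (l :: (tw ++ dw)) true = pvBody (l :: (tw ++ dw)) := by
  have htwp : ∀ x ∈ tw, pvNB x := by intro x hx; simp [pvNB, htw x hx]
  have htkdw : dw.takeWhile pvNB = [] := by
    rcases hdw with rfl | ⟨ds, rfl⟩ <;> simp [pvNB]
  have hdpdw : dw.dropWhile pvNB = dw := by
    rcases hdw with rfl | ⟨ds, rfl⟩ <;> simp [pvNB]
  have hparas : pvParas (l :: (tw ++ dw)) = (l :: tw) :: pvParas dw := by
    rw [pvParas, if_neg hl, List.takeWhile_append_of_pos htwp, htkdw,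
      List.dropWhile_append_of_pos htwp, hdpdw]
    simp
  have hstep : pvRecA (l :: (tw ++ dw)) true = l :: (tw ++ pvRecA dw false) := by
    rw [show pvRecA (l :: (tw ++ dw)) true = l :: pvRecA (tw ++ dw) false by
      simp [pvRecA, hl], pvRecA_push tw dw htw]
  rw [hstep]
  rcases hdw with rfl | ⟨ds, rfl⟩
  · -- dw = []
    have htrail : pvTrail (l :: (tw ++ [])) = false := by
      have hall : ∀ x ∈ l :: (tw ++ []), x ≠ "" := by
        intro x hx
        rcases List.mem_cons.1 hx with rfl | hx'
        · exact hl
        · exact htw x (by simpa using hx')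
      simp only [pvTrail, beq_eq_false_iff_ne, ne_eq]
      rw [List.getLast?_eq_some_getLast (by simp)]
      intro hc
      exact hall _ (List.getLast_mem _) (by injection hc)
    unfold pvBody
    rw [hparas, htrail]
    simp [pvParas, List.intercalate, pvRecA]
  · -- dw = "" :: ds
    have hrecdw : pvRecA ("" :: ds) false = "" :: pvRecA ("" :: ds) true := by
      simp [pvRecA]
    rw [hrecdw, ih]
    unfold pvBody
    rw [hparas]
    have hlastc : (l :: (tw ++ "" :: ds)).getLast? = ("" :: ds).getLast? := by
      rw [List.getLast?_cons, List.getLast?_append_of_ne_nil _ (by simp)]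
      simp [List.getLast?_cons]
    rcases eq_or_ne (pvParas ("" :: ds)) [] with hpd | hpd
    · have hallb : ∀ x ∈ ("" :: ds), x = "" := (pvParas_nil_iff _).1 hpd
      have htrail : pvTrail (l :: (tw ++ "" :: ds)) = true := by
        simp only [pvTrail, beq_iff_eq]
        rw [hlastc, pvGetLast_all_blank _ (by simp) hallb]
      rw [hpd, htrail]
      simp [List.intercalate, List.intersperse]
    · have htrail : pvTrail (l :: (tw ++ "" :: ds)) = pvTrail ("" :: ds) := by
        unfold pvTrail; rw [hlastc]
      rw [if_neg hpd, if_neg (by simp : ¬((l :: tw) :: pvParas ("" :: ds) = [])),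
        intercalate_cons₂ _ _ _ hpd, htrail]
      simp

theorem pvRecA_true_eq_body (ls : List String) : pvRecA ls true = pvBody ls := by
  induction ls using pvParas.induct with
  | case1 => simp [pvRecA, pvBody, pvParas]
  | case2 ls ih =>
    show pvRecA ls true = _
    rw [ih]
    unfold pvBody
    rcases eq_or_ne ls [] with rfl | hne
    · simp [pvParas]
    · rw [show pvParas ("" :: ls) = pvParas ls by simp [pvParas]]
      rw [show pvTrail ("" :: ls) = pvTrail ls by
        obtain ⟨y, ys, rfl⟩ := List.exists_cons_of_ne_nil hne
        simp [pvTrail]]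
  | case3 l ls h ih =>
    rw [show ls = ls.takeWhile pvNB ++ ls.dropWhile pvNB from
      (List.takeWhile_append_dropWhile).symm]
    refine pvCase3_aux l h _ _ ?_ ?_ ?_
    · intro x hx
      have := List.mem_takeWhile_imp hx
      simpa [pvNB] using this
    · rcases hdd : ls.dropWhile pvNB with _ | ⟨d, ds⟩
      · exact Or.inl rfl
      · refine Or.inr ⟨ds, ?_⟩
        have hd : d = "" := by simpa [pvNB] using pvDropWhile_head pvNB ls d ds hdd
        rw [hd]
    · exact ih

theorem pvRecA_false_eq (ls : List String) :
    pvRecA ls false = (if ls.head? = some "" then [""] else []) ++ pvBody ls := by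
  rcases ls with _ | ⟨l, ls⟩
  · simp [pvRecA, pvBody, pvParas]
  · by_cases h : l = ""
    · subst h
      rw [show pvRecA ("" :: ls) false = "" :: pvRecA ("" :: ls) true by simp [pvRecA]]
      rw [pvRecA_true_eq_body]
      simp
    · rw [show pvRecA (l :: ls) false = pvRecA (l :: ls) true by simp [pvRecA, h]]
      rw [pvRecA_true_eq_body]
      simp [h]

theorem pvParas_mem (ls : List String) (p : List String) (hp : p ∈ pvParas ls) :
    p ≠ [] ∧ ∀ x ∈ p, x ≠ "" ∧ x ∈ ls := by
  induction ls using pvParas.induct with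
  | case1 => simp [pvParas] at hp
  | case2 ls ih =>
    rw [show pvParas ("" :: ls) = pvParas ls by simp [pvParas]] at hp
    obtain ⟨h1, h2⟩ := ih hp
    exact ⟨h1, fun x hx => ⟨(h2 x hx).1, List.mem_cons_of_mem _ (h2 x hx).2⟩⟩
  | case3 l ls h ih =>
    rw [pvParas, if_neg h] at hp
    rcases List.mem_cons.1 hp with rfl | hp'
    · refine ⟨by simp, ?_⟩
      intro x hx
      rcases List.mem_cons.1 hx with rfl | hx'
      · exact ⟨h, by simp⟩
      · have hxm := List.mem_takeWhile_imp hx'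
        refine ⟨by simpa [pvNB] using hxm, ?_⟩
        exact List.mem_cons_of_mem _ ((List.takeWhile_sublist _).subset hx')
    · obtain ⟨h1, h2⟩ := ih hp'
      refine ⟨h1, fun x hx => ⟨(h2 x hx).1, ?_⟩⟩
      exact List.mem_cons_of_mem _ ((List.dropWhile_sublist _).subset (h2 x hx).2)

theorem pvFoldA (ls : List String) (acc : List String) (prev : Bool) :
    (ls.foldl pvStepA (acc, prev)).1 = acc ++ pvRecA ls prev := by
  induction ls generalizing acc prev with
  | nil => simp [pvRecA]
  | cons l ls ih =>
    cases prev <;> by_cases h : l = "" <;>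
      simp [pvStepA, pvRecA, h, ih, List.append_assoc]


/-- Everything but the splitlines: A's stripped-collapse-join-strip equals B's paragraph join,
for any list of lines each of which is the `strip` of something. -/
theorem pvMain (lines : List String)
    (hstr : ∀ x ∈ lines, ∃ t : List Char, x.toList = PySem.Chars.strip t) :
    PySem.Str.strip (PySem.Str.join "\n" (lines.foldl pvStepA ([], false)).1)
      = PySem.Str.join "\n\n" ((pvParas lines).map (PySem.Str.join "\n")) := by
  have hconv : ∀ u : List String, PySem.Str.strip (PySem.Str.join "\n" u)
      = String.ofList (PySem.Chars.strip (['\n'].intercalate (u.map String.toList))) := by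
    intro u
    simp [PySem.Str.strip, PySem.Str.join, PySem.Chars.join]
  have hedge : ∀ x ∈ lines, x ≠ "" →
      (∀ c, x.toList.head? = some c → PySem.Chars.isspace c = false) ∧
      (∀ c, x.toList.getLast? = some c → PySem.Chars.isspace c = false) ∧ x.toList ≠ [] := by
    intro x hx hxne
    obtain ⟨t, ht⟩ := hstr x hx
    refine ⟨fun c hc => strip_head_nonspace t c (ht ▸ hc),
      fun c hc => strip_last_nonspace t c (ht ▸ hc), ?_⟩
    simpa [String.toList_eq_nil_iff] using hxne
  rw [pvFoldA, List.nil_append, pvRecA_false_eq]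
  rcases hps : pvParas lines with _ | ⟨q, qs⟩
  · -- no non-blank line at all
    unfold pvBody
    rw [hps, if_pos rfl, List.append_nil]
    by_cases hh : lines.head? = some ""
    · rw [if_pos hh, hconv]
      simp [PySem.Str.join, PySem.Chars.join, List.intercalate, PySem.Chars.strip,
        PySem.Chars.lstrip, PySem.Chars.rstrip]
    · rw [if_neg hh, hconv]
      simp [PySem.Str.join, PySem.Chars.join, List.intercalate, PySem.Chars.strip,
        PySem.Chars.lstrip, PySem.Chars.rstrip]
  · -- at least one paragraph
    have hmem : ∀ p ∈ q :: qs, p ≠ [] ∧ ∀ x ∈ p, x ≠ "" ∧ x ∈ lines := by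
      intro p hp; exact pvParas_mem lines p (hps ▸ hp)
    have hqne : q ≠ [] := (hmem q (by simp)).1
    obtain ⟨f, ft, rfl⟩ := List.exists_cons_of_ne_nil hqne
    have hfprop := (hmem (f :: ft) (by simp)).2 f (by simp)
    have hfedge := hedge f hfprop.2 hfprop.1
    -- the last line of the last paragraph
    set lp := (((f :: ft) :: qs).getLast (by simp)) with hlp
    have hlp? : ((f :: ft) :: qs).getLast? = some lp := List.getLast?_eq_some_getLast (by simp)
    have hlpne : lp ≠ [] := (hmem lp (List.getLast_mem _)).1
    set g := lp.getLast hlpne with hg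
    have hg? : lp.getLast? = some g := List.getLast?_eq_some_getLast hlpne
    have hgprop := (hmem lp (List.getLast_mem _)).2 g (List.getLast_mem hlpne)
    have hgedge := hedge g hgprop.2 hgprop.1
    -- W and its edges
    set W := List.intercalate [""] ((f :: ft) :: qs) with hW
    have hWhead : W.head? = some f := by
      rw [hW, head?_inter _ _ _ (by simp)]; rfl
    have hWlast : W.getLast? = some g := by
      rw [hW, getLast?_inter [""] (by simp) _ lp hlp? hlpne, hg?]
    obtain ⟨W', hW'⟩ := List.head?_eq_some_iff.mp hWhead
    have hWmne : W.map String.toList ≠ [] := by rw [hW']; simp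
    -- peeling a leading/trailing blank line off the join before the strip
    have hpeelL : ∀ u : List String, u.map String.toList ≠ [] →
        PySem.Chars.strip (['\n'].intercalate ((([""] : List String) ++ u).map String.toList))
        = PySem.Chars.strip (['\n'].intercalate (u.map String.toList)) := by
      intro u hu
      obtain ⟨v, vs, hv⟩ := List.exists_cons_of_ne_nil hu
      rw [List.map_append, hv, show ([""] : List String).map String.toList ++ (v :: vs) = [] :: v :: vs by simp,
        intercalate_cons₂ _ _ _ (by simp)]
      simpa using strip_cons_nl (['\n'].intercalate (v :: vs))
    have hpeelR : ∀ u : List String, u.map String.toList ≠ [] →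
        PySem.Chars.strip (['\n'].intercalate ((u ++ [""]).map String.toList))
        = PySem.Chars.strip (['\n'].intercalate (u.map String.toList)) := by
      intro u hu
      rw [List.map_append, inter_append _ _ _ hu (by simp),
        show (([""] : List String).map String.toList) = [[]] by simp]
      simpa [List.intercalate] using strip_append_nl (['\n'].intercalate (u.map String.toList))
    -- the stripped core is already clean
    set Z := ['\n'].intercalate (W.map String.toList) with hZ
    have hZhead : Z.head? = f.toList.head? := by
      rw [hZ, hW', List.map_cons, head?_inter _ _ _ hfedge.2.2]
    have hZlast : Z.getLast? = g.toList.getLast? := by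
      rw [hZ, getLast?_inter ['\n'] (by simp) _ g.toList
        (by rw [List.getLast?_map, hWlast]; rfl) (by exact hgedge.2.2)]
    have hZclean : PySem.Chars.strip Z = Z :=
      strip_id Z (fun c hc => hfedge.1 c (hZhead ▸ hc)) (fun c hc => hgedge.2.1 c (hZlast ▸ hc))
    -- restructure the double join
    have hJR : Z = ['\n', '\n'].intercalate
        (((f :: ft) :: qs).map (fun p => ['\n'].intercalate (p.map String.toList))) := by
      rw [hZ, hW]; exact pvJR _ (fun p hp => (hmem p hp).1)
    -- assemble
    unfold pvBody
    rw [hps, if_neg (show ¬((f :: ft) :: qs = []) from by simp)]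
    have hmapeq : List.map String.toList (((f :: ft) :: qs).map (PySem.Str.join "\n"))
        = ((f :: ft) :: qs).map (fun p => ['\n'].intercalate (List.map String.toList p)) := by
      rw [List.map_map]
      refine List.map_congr_left ?_
      intro p hp
      simp [Function.comp, PySem.Str.join, PySem.Chars.join]
    have hRHS : PySem.Str.join "\n\n" (((f :: ft) :: qs).map (PySem.Str.join "\n"))
        = String.ofList Z := by
      rw [show PySem.Str.join "\n\n" (((f :: ft) :: qs).map (PySem.Str.join "\n"))
          = String.ofList (PySem.Chars.join "\n\n".toList
              (List.map String.toList (((f :: ft) :: qs).map (PySem.Str.join "\n")))) from rfl,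
        hmapeq, show ("\n\n".toList) = ['\n', '\n'] from rfl]
      rw [PySem.Chars.join, ← hJR]
    rw [hRHS, hconv]
    have hWtbne : (W ++ [""]).map String.toList ≠ [] := by simp
    congr 1
    by_cases htb : pvTrail lines = true <;> by_cases hh : lines.head? = some ""
    · rw [if_pos htb, if_pos hh, hpeelL _ hWtbne, hpeelR _ hWmne, hZclean]
    · rw [if_pos htb, if_neg hh, List.nil_append, hpeelR _ hWmne, hZclean]
    · rw [if_neg htb, if_pos hh, List.append_nil, hpeelL _ hWmne, hZclean]
    · rw [if_neg htb, if_neg hh, List.nil_append, List.append_nil, hZclean]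

-- ===== VERDICT (by name: the statement is the Claim_ definition above) =====
theorem regulate_str_spec : Claim_equal_regulate_str := by
  intro input_str _
  unfold Spec_regulate_str regulate_str regulate_str_alt
  dsimp only
  rw [pvMain]
  intro x hx
  obtain ⟨t, ht, rfl⟩ := List.mem_map.mp hx
  exact ⟨t.toList, by simp [PySem.Str.strip]⟩
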